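-- pv_equiv track=rewrite | github.com/TortugaLabs/mypielib | mypielib/strtr.py | strtr
-- ===== SOURCE A (Python) =====
-- def strtr(strng:str, replace:dict[str]) -> str:
--   '''Replaces substrings defined in the `replace` dictionary with
--   its replacement value.
--
--   :param str string: String to convert
--   :param dict replace: Mapping of string substitutions
--   :returns str: string with the replaced contents
--
--   Based on
--   [phps-strtr-for-python](https://stackoverflow.com/questions/10931150/phps-strtr-for-python).
--
--   Equivalent to php [strtr](https://www.php.net/manual/en/function.strtr.php)
--   function.
--
--   Example:
--   ```{doctest}
--
--   >>> from mypielib.strtr import strtr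
--   >>> strtr('one two three',{'one': '1', 'two': '2', 'three': '3'})
--   '1 2 3'
--
--   ```
--
--   '''
--   buf, i = [], 0
--   while i < len(strng):
--     for s, r in replace.items():
--       if strng[i:len(s)+i] == s:
--         buf.append(r)
--         i += len(s)
--         break
--     else:
--       buf.append(strng[i])
--       i += 1
--   return ''.join(buf)
-- ===== SOURCE B (Python) =====
-- def strtr(strng: str, replace: dict) -> str:
--   '''Chunked rewrite: instead of testing every key at every single index, jump
--   with str.find to the earliest next occurrence of any key (insertion order
--   breaks ties), caching each key's next occurrence and copying every untouched
--   stretch in one slice.'''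
--   items = list(replace.items())
--   n = len(strng)
--   nxt = [strng.find(k, 0) for k, _ in items]
--   buf, i = [], 0
--   while i < n:
--     p, best, nxt2 = n, None, []
--     for (k, r), q in zip(items, nxt):
--       if q != -1 and q < i:
--         q = strng.find(k, i)
--       nxt2.append(q)
--       if q != -1 and q < p:
--         p, best = q, (k, r)
--     nxt = nxt2
--     if best is None:
--       break
--     buf.append(strng[i:p])
--     buf.append(best[1])
--     i = p + len(best[0])
--   buf.append(strng[i:])
--   return ''.join(buf)
-- ===== Notes on version B (the rewrite author's own statement) =====
-- stated objective: faster
-- what changed: Instead of testing every key against every single position and appending character by character, B uses str.find to jump to the earliest next occurrence of any key (insertion order breaking ties at equal positions), caching each key's next occurrence between chunks and copying each untouched stretch with one slice.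
-- outside the precondition, e.g. on strtr('a', {'a': 'x', '': 'y'}): A returns 'x', B returns 'x'
import Mathlib
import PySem

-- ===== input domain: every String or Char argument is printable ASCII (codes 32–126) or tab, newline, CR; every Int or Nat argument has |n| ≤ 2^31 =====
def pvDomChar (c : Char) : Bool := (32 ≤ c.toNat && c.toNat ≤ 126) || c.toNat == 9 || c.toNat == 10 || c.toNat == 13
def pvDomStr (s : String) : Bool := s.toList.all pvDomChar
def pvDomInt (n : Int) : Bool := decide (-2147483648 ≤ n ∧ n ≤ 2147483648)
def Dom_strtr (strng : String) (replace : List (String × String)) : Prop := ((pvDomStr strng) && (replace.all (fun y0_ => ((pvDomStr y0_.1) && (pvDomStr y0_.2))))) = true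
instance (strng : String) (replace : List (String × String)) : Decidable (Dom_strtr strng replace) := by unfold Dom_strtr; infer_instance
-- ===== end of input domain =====

-- B replaces A's per-character scan over all keys by str.find jumps to the next
-- occurrence of any key (insertion order breaks ties), copying untouched
-- stretches as whole slices; a timing run measures whether that is faster.

-- ===== PORT A =====
-- the inner `for s, r in replace.items(): if strng[i:len(s)+i] == s: … break / else:`
def strtrFind (cs : List Char) (i : Nat) : List (String × String) → Option (String × String)
  | [] => none
  | (s, r) :: rest =>
    if PySem.List.slice cs (some (i : Int)) (some ((s.toList.length + i : Nat) : Int)) = s.toList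
    then some (s, r)
    else strtrFind cs i rest

-- the `while i < len(strng)` loop; fuel `cs.length` is enough under Pre_ (each step advances i by ≥ 1)
def strtrLoop (cs : List Char) (items : List (String × String)) : Nat → Nat → List String → List String
  | 0, _, buf => buf
  | fuel+1, i, buf =>
    if i < cs.length then
      match strtrFind cs i items with
      | some (s, r) => strtrLoop cs items fuel (i + s.toList.length) (buf ++ [r])
      | none => strtrLoop cs items fuel (i + 1) (buf ++ [String.ofList [cs.getD i ' ']])
    else buf

def strtr (strng : String) (replace : List (String × String)) : String :=
  PySem.Str.join "" (strtrLoop strng.toList (PySem.Dict.ofList replace).items strng.toList.length 0 [])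

-- ===== PORT B =====
-- the inner `for (k, r), q in zip(items, nxt): …` of B: refresh stale cached positions,
-- rebuild the cache list, and keep the earliest occurrence (first item wins ties)
def strtrAltScan (cs : List Char) (i : Nat) (pairs : List ((String × String) × Int)) :
    (Int × Option (String × String)) × List Int :=
  pairs.foldl
    (fun st pv =>
      let q := if pv.2 ≠ -1 ∧ pv.2 < (i : Int)
               then PySem.Chars.findFrom cs pv.1.1.toList (i : Int) none
               else pv.2
      let nxt2 := st.2 ++ [q]
      if q ≠ -1 ∧ q < st.1.1 then ((q, some pv.1), nxt2) else ((st.1.1, st.1.2), nxt2))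
    (((cs.length : Int), none), [])

-- the `while i < n` chunk loop of B; returns final i and buf (fuel `cs.length` is enough under Pre_)
def strtrAltLoop (cs : List Char) (items : List (String × String)) :
    Nat → Nat → List Int → List String → Nat × List String
  | 0, i, _, buf => (i, buf)
  | fuel+1, i, nxt, buf =>
    if i < cs.length then
      match strtrAltScan cs i (items.zip nxt) with
      | ((p, some (k, r)), nxt2) =>
          strtrAltLoop cs items fuel (p.toNat + k.toList.length) nxt2
            (buf ++ [String.ofList (PySem.List.slice cs (some (i : Int)) (some p))] ++ [r])
      | ((_, none), _) => (i, buf)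
    else (i, buf)

def strtr_alt (strng : String) (replace : List (String × String)) : String :=
  let cs := strng.toList
  let items := (PySem.Dict.ofList replace).items
  let nxt := items.map (fun kr => PySem.Chars.findFrom cs kr.1.toList 0 none)
  let res := strtrAltLoop cs items cs.length 0 nxt []
  PySem.Str.join "" (res.2 ++ [String.ofList (PySem.List.slice cs (some (res.1 : Int)) none)])

-- ===== PRECONDITION & SPEC =====
-- Pre_ excludes dicts containing the empty-string key (on a nonempty string): there a
-- match can advance i by 0 characters, and both A and B loop forever unless an earlier
-- key happens to match at every remaining position (an accident of insertion order).
def Pre_strtr (strng : String) (replace : List (String × String)) : Prop :=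
  strng = "" ∨ ∀ p ∈ replace, p.1 ≠ ""
instance (strng : String) (replace : List (String × String)) : Decidable (Pre_strtr strng replace) := by unfold Pre_strtr; infer_instance

def pvWitness_strtr : String × (List (String × String)) :=
  ("one two three", [("one", "1"), ("two", "2"), ("three", "3")])

def Spec_strtr (strng : String) (replace : List (String × String)) (out : String) : Prop := out = strtr_alt strng replace
instance (strng : String) (replace : List (String × String)) (out : String) : Decidable (Spec_strtr strng replace out) := by unfold Spec_strtr; infer_instance

-- ===== CLAIM (what is proved, stated in full; the proofs are below) =====
def Claim_equal_strtr : Prop := ∀ (strng : String) (replace : List (String × String)), Dom_strtr strng replace → Pre_strtr strng replace → Spec_strtr strng replace (strtr strng replace)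

-- ===== LEMMAS AND PROOFS =====

-- flattening of the buffers, for reasoning below
def pvFlat (l : List String) : List Char := (l.map String.toList).flatten

theorem pvFlat_append_singleton (l : List String) (s : String) :
    pvFlat (l ++ [s]) = pvFlat l ++ s.toList := by
  simp [pvFlat]

theorem pvFlat_append (a b : List String) : pvFlat (a ++ b) = pvFlat a ++ pvFlat b := by
  simp [pvFlat]

theorem pvFlat_singleton (s : String) : pvFlat [s] = s.toList := by
  simp [pvFlat]

theorem pvFlat_singletons (l : List Char) :
    pvFlat (l.map (fun c => String.ofList [c])) = l := by
  induction l with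
  | nil => simp [pvFlat]
  | cons c t ih => simpa [pvFlat] using ih

-- keys of the dict built from `replace` are keys of `replace`
theorem keys_foldl_insert_sub (l : List (String × String)) (d : PySem.Dict String String) (k : String)
    (h : k ∈ (l.foldl (fun acc p => acc.insert p.1 p.2) d).keys) : k ∈ d.keys ∨ k ∈ l.map Prod.fst := by
  induction l generalizing d with
  | nil => exact Or.inl h
  | cons x xs ih =>
    rcases ih _ h with h' | h'
    · rw [PySem.Dict.mem_keys_insert] at h'
      rcases h' with h' | h'
      · exact Or.inr (by simp [h'])
      · exact Or.inl h'
    · exact Or.inr (by simp [h'])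

theorem items_key_nonempty (replace : List (String × String)) (hpre : ∀ p ∈ replace, p.1 ≠ "")
    (kr : String × String) (h : kr ∈ (PySem.Dict.ofList replace).items) : kr.1.toList ≠ [] := by
  have h2 := PySem.Dict.mem_keys_of_mem_items _ h
  rw [PySem.Dict.ofList, PySem.Dict.update] at h2
  rcases keys_foldl_insert_sub replace _ _ h2 with h' | h'
  · simp [PySem.Dict.keys_empty] at h'
  · obtain ⟨p, hp, hfst⟩ := List.mem_map.mp h'
    intro hnil
    exact hpre p hp (hfst ▸ String.toList_eq_nil_iff.mp hnil)

-- the slice test in A is a prefix test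
theorem slice_eq_iff_prefix (cs : List Char) (i : Nat) (s : String) :
    (PySem.List.slice cs (some (i : Int)) (some ((s.toList.length + i : Nat) : Int)) = s.toList)
    ↔ s.toList <+: cs.drop i := by
  rw [PySem.List.slice_natCast]
  have h : s.toList.length + i - i = s.toList.length := by omega
  rw [h]
  constructor
  · intro h2; rw [← h2]; exact List.take_prefix _ _
  · intro h2; exact (List.prefix_iff_eq_take.mp h2).symm

theorem strtrFind_mem (cs : List Char) (i : Nat) (its : List (String × String)) (kr : String × String)
    (h : strtrFind cs i its = some kr) : kr ∈ its := by
  induction its with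
  | nil => simp [strtrFind] at h
  | cons x rest ih =>
    obtain ⟨xs, xr⟩ := x
    rw [strtrFind] at h
    split at h
    · cases h; exact List.mem_cons_self
    · exact List.mem_cons_of_mem _ (ih h)

theorem strtrFind_append (cs : List Char) (i : Nat) (its : List (String × String)) (x : String × String) :
    strtrFind cs i (its ++ [x]) =
      match strtrFind cs i its with
      | some y => some y
      | none => if x.1.toList <+: cs.drop i then some x else none := by
  induction its with
  | nil =>
    obtain ⟨xs, xr⟩ := x
    simp only [List.nil_append, strtrFind]
    by_cases hc : xs.toList <+: cs.drop i
    · rw [if_pos ((slice_eq_iff_prefix cs i xs).mpr hc), if_pos hc]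
    · rw [if_neg (fun h => hc ((slice_eq_iff_prefix cs i xs).mp h)), if_neg hc]
  | cons y rest ih =>
    obtain ⟨ys, yr⟩ := y
    simp only [List.cons_append, strtrFind]
    split
    · rfl
    · exact ih

-- invariant established by B's inner scan
def pvGood (cs : List Char) (its : List (String × String)) (i : Nat)
    (st : Int × Option (String × String)) : Prop :=
  match st.2 with
  | none => st.1 = (cs.length : Int) ∧ ∀ pos, i ≤ pos → strtrFind cs pos its = none
  | some kr =>
      0 ≤ st.1 ∧ i ≤ st.1.toNat ∧ st.1.toNat + kr.1.toList.length ≤ cs.length ∧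
      strtrFind cs st.1.toNat its = some kr ∧
      ∀ pos, i ≤ pos → pos < st.1.toNat → strtrFind cs pos its = none

theorem prefix_drop_infix (cs k : List Char) (i pos : Nat) (hip : i ≤ pos) (h : k <+: cs.drop pos) :
    k <:+: cs.drop i := by
  obtain ⟨t, ht⟩ := h
  refine ⟨(cs.drop i).take (pos - i), t, ?_⟩
  rw [List.append_assoc, ht]
  have h2 : List.drop pos cs = List.drop (pos - i) (List.drop i cs) := by
    rw [List.drop_drop]; congr 1; omega
  rw [h2, List.take_append_drop]

-- cache invariant: a stored position v for key k is -1 only if k never occurs at or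
-- after i, and otherwise points at an occurrence of k with none in [i, v)
def pvInv (cs : List Char) (i : Nat) (k : String) (v : Int) : Prop :=
  (v = -1 → ∀ pos, i ≤ pos → ¬ k.toList <+: cs.drop pos) ∧
  (v ≠ -1 → 0 ≤ v ∧ k.toList <+: cs.drop v.toNat ∧
    ∀ pos, i ≤ pos → pos < v.toNat → ¬ k.toList <+: cs.drop pos)

theorem pvInv_mono (cs : List Char) (i i' : Nat) (k : String) (v : Int)
    (h : pvInv cs i k v) (hle : i ≤ i') : pvInv cs i' k v := by
  obtain ⟨h1, h2⟩ := h
  refine ⟨fun hv pos hp => h1 hv pos (by omega), fun hv => ?_⟩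
  obtain ⟨ha, hb, hc⟩ := h2 hv
  exact ⟨ha, hb, fun pos hp1 hp2 => hc pos (by omega) hp2⟩

-- one scan step preserves the state characterisation
theorem step_good (cs : List Char) (its : List (String × String)) (i : Nat)
    (x : String × String) (q p0 : Int) (b0 : Option (String × String))
    (hx : x.1.toList ≠ [])
    (hg : pvGood cs its i (p0, b0))
    (hq1 : q = -1 → ∀ pos, i ≤ pos → ¬ x.1.toList <+: cs.drop pos)
    (hq2 : q ≠ -1 → (i : Int) ≤ q ∧ x.1.toList <+: cs.drop q.toNat ∧
      ∀ m, i ≤ m → m < q.toNat → ¬ x.1.toList <+: cs.drop m) :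
    pvGood cs (its ++ [x]) i (if q ≠ -1 ∧ q < p0 then (q, some x) else (p0, b0)) := by
  have hq2' : q ≠ -1 → q.toNat + x.1.toList.length ≤ cs.length := by
    intro hne
    have hlen := (hq2 hne).2.1.length_le
    rw [List.length_drop] at hlen
    have hpos : 0 < x.1.toList.length := List.length_pos_of_ne_nil hx
    omega
  by_cases hcond : q ≠ -1 ∧ q < p0
  · rw [if_pos hcond]
    obtain ⟨hne, hlt⟩ := hcond
    obtain ⟨hle, hpref, hmin⟩ := hq2 hne
    have hbound := hq2' hne
    have hq0 : (0:Int) ≤ q := le_trans (by positivity) hle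
    have hqn : q.toNat < cs.length := by
      have hpos : 0 < x.1.toList.length := List.length_pos_of_ne_nil hx
      omega
    have hiq : i ≤ q.toNat := by omega
    cases b0 with
    | none =>
      obtain ⟨hstop, hnone⟩ := hg
      refine ⟨hq0, hiq, hbound, ?_, ?_⟩
      · rw [strtrFind_append, hnone q.toNat hiq, if_pos hpref]
      · intro pos hip hlt2
        rw [strtrFind_append, hnone pos hip, if_neg (hmin pos hip hlt2)]
    | some kr =>
      obtain ⟨h0, hile, hbd, hfind, hbelow⟩ := hg
      have hqlt : q.toNat < p0.toNat := by omega
      refine ⟨hq0, hiq, hbound, ?_, ?_⟩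
      · rw [strtrFind_append, hbelow q.toNat hiq hqlt, if_pos hpref]
      · intro pos hip hlt2
        rw [strtrFind_append, hbelow pos hip (by omega), if_neg (hmin pos hip hlt2)]
  · rw [if_neg hcond]
    cases b0 with
    | none =>
      obtain ⟨hstop, hnone⟩ := hg
      refine ⟨hstop, ?_⟩
      intro pos hip
      rw [strtrFind_append, hnone pos hip]
      by_cases hqe : q = -1
      · rw [if_neg (hq1 hqe pos hip)]
      · exfalso
        obtain ⟨hle, hpref, hmin⟩ := hq2 hqe
        have hbound := hq2' hqe
        have hpos : 0 < x.1.toList.length := List.length_pos_of_ne_nil hx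
        apply hcond
        refine ⟨hqe, ?_⟩
        simp only at hstop
        rw [hstop]
        omega
    | some kr =>
      obtain ⟨h0, hile, hbd, hfind, hbelow⟩ := hg
      refine ⟨h0, hile, hbd, ?_, ?_⟩
      · rw [strtrFind_append, hfind]
      · intro pos hip hlt2
        rw [strtrFind_append, hbelow pos hip hlt2]
        by_cases hqe : q = -1
        · rw [if_neg (hq1 hqe pos hip)]
        · obtain ⟨hle, hpref, hmin⟩ := hq2 hqe
          have hple : p0 ≤ q := by
            by_contra hcc
            exact hcond ⟨hqe, by omega⟩
          rw [if_neg (hmin pos hip (by omega))]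

-- B's scan establishes pvGood and returns a cache list satisfying pvInv again
theorem scan_good (cs : List Char) (i : Nat) :
    ∀ pairs : List ((String × String) × Int),
    (∀ pv ∈ pairs, pv.1.1.toList ≠ [] ∧ pvInv cs i pv.1.1 pv.2) → i ≤ cs.length →
    pvGood cs (pairs.map Prod.fst) i (strtrAltScan cs i pairs).1 ∧
    (strtrAltScan cs i pairs).2.length = pairs.length ∧
    (∀ pv ∈ (pairs.map Prod.fst).zip (strtrAltScan cs i pairs).2,
      pv.1.1.toList ≠ [] ∧ pvInv cs i pv.1.1 pv.2) := by
  intro pairs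
  induction pairs using List.reverseRecOn with
  | nil =>
    intro _ _
    exact ⟨⟨rfl, fun pos _ => rfl⟩, rfl, by simp⟩
  | append_singleton pairs x ih =>
    intro hall hi
    have hall' : ∀ pv ∈ pairs, pv.1.1.toList ≠ [] ∧ pvInv cs i pv.1.1 pv.2 :=
      fun pv h => hall pv (List.mem_append_left _ h)
    obtain ⟨hx, hxinv⟩ := hall x (List.mem_append_right _ List.mem_cons_self)
    obtain ⟨ihg, ihlen, ihinv⟩ := ih hall' hi
    rw [strtrAltScan, List.foldl_append, ← strtrAltScan]
    rcases hst : strtrAltScan cs i pairs with ⟨⟨p0, b0⟩, nxt2⟩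
    rw [hst] at ihg ihlen ihinv
    simp only [List.foldl_cons, List.foldl_nil]
    set q := if x.2 ≠ -1 ∧ x.2 < (i : Int)
             then PySem.Chars.findFrom cs x.1.1.toList (i : Int) none
             else x.2 with hqdef
    -- the used value q satisfies the two facts step_good needs, and pvInv
    have hq1 : q = -1 → ∀ pos, i ≤ pos → ¬ x.1.1.toList <+: cs.drop pos := by
      intro hqe pos hip hpref
      rw [hqdef] at hqe
      split at hqe
      · exact (PySem.Chars.findFrom_natCast_eq_neg_one_iff cs x.1.1.toList i hi).mp hqe
          (prefix_drop_infix cs _ i pos hip hpref)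
      · exact (hxinv.1 hqe) pos hip hpref
    have hq2 : q ≠ -1 → (i : Int) ≤ q ∧ x.1.1.toList <+: cs.drop q.toNat ∧
        ∀ m, i ≤ m → m < q.toNat → ¬ x.1.1.toList <+: cs.drop m := by
      intro hne
      rw [hqdef] at hne ⊢
      split at hne
      · obtain ⟨h1, h2, h3⟩ := PySem.Chars.findFrom_natCast_spec cs x.1.1.toList i hi hne
        next hcc => rw [if_pos hcc]; exact ⟨h1, h2, h3⟩
      · next hcc =>
        rw [if_neg hcc]
        obtain ⟨h0, hocc, hmin⟩ := hxinv.2 hne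
        have : ¬ x.2 < (i : Int) := by
          by_contra hlt
          exact hcc ⟨hne, hlt⟩
        exact ⟨by omega, hocc, hmin⟩
    have hqinv : pvInv cs i x.1.1 q := by
      refine ⟨fun hqe => hq1 hqe, fun hne => ?_⟩
      obtain ⟨h1, h2, h3⟩ := hq2 hne
      exact ⟨le_trans (by positivity) h1, h2, h3⟩
    refine ⟨?_, ?_, ?_⟩
    · have := step_good cs (pairs.map Prod.fst) i x.1 q p0 b0 hx ihg hq1 hq2
      split
      · next hcc =>
        have h2 := this
        rw [if_pos hcc] at h2
        simpa using h2
      · next hcc =>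
        have h2 := this
        rw [if_neg hcc] at h2
        simpa using h2
    · split <;> simp [ihlen]
    · have hzip : (List.map Prod.fst (pairs ++ [x])).zip (nxt2 ++ [q]) =
          ((pairs.map Prod.fst).zip nxt2) ++ [(x.1, q)] := by
        rw [List.map_append]
        exact List.zip_append (by simp [ihlen])
      intro pv hpv
      split at hpv <;>
      · simp only at hpv
        rw [hzip] at hpv
        rcases List.mem_append.mp hpv with h | h
        · exact ihinv pv h
        · rcases List.mem_singleton.mp h with rfl
          exact ⟨hx, hqinv⟩

theorem strtrLoop_skip (cs : List Char) (its : List (String × String)) (d : Nat) :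
    ∀ i buf, i + d ≤ cs.length →
    (∀ pos, i ≤ pos → pos < i + d → strtrFind cs pos its = none) →
    strtrLoop cs its (cs.length - i) i buf =
      strtrLoop cs its (cs.length - (i + d)) (i + d)
        (buf ++ ((cs.drop i).take d).map (fun c => String.ofList [c])) := by
  induction d with
  | zero => intro i buf _ _; simp
  | succ d ih =>
    intro i buf hle h
    have hlt : i < cs.length := by omega
    rw [show cs.length - i = (cs.length - (i + 1)) + 1 from by omega, strtrLoop,
        if_pos hlt, h i le_rfl (by omega)]
    have := ih (i + 1) (buf ++ [String.ofList [cs.getD i ' ']]) (by omega)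
      (fun pos h1 h2 => h pos (by omega) (by omega))
    rw [show i + 1 + d = i + (d + 1) from by omega] at this
    rw [this]
    have hbuf : (List.take (d + 1) (List.drop i cs)) = cs[i] :: List.take d (List.drop (i + 1) cs) := by
      rw [List.drop_eq_getElem_cons hlt]
      rw [List.take_succ_cons]
    rw [hbuf, List.getD_eq_getElem cs ' ' hlt]
    simp

theorem strtrLoop_nomatch (cs : List Char) (its : List (String × String)) (i : Nat) (buf : List String)
    (hi : i ≤ cs.length) (h : ∀ pos, i ≤ pos → strtrFind cs pos its = none) :
    strtrLoop cs its (cs.length - i) i buf = buf ++ (cs.drop i).map (fun c => String.ofList [c]) := by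
  have := strtrLoop_skip cs its (cs.length - i) i buf (by omega)
    (fun pos h1 _ => h pos h1)
  rw [show cs.length - (i + (cs.length - i)) = 0 from by omega] at this
  rw [this, strtrLoop]
  congr 2
  exact List.take_of_length_le (by simp)

-- any sufficient fuel computes the same buffer
theorem strtrLoop_fuel (cs : List Char) (its : List (String × String))
    (hk : ∀ kr ∈ its, kr.1.toList ≠ []) :
    ∀ fuel i buf, cs.length - i ≤ fuel →
    strtrLoop cs its fuel i buf = strtrLoop cs its (cs.length - i) i buf := by
  intro fuel
  induction fuel using Nat.strong_induction_on with
  | _ fuel ih =>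
    intro i buf hle
    cases fuel with
    | zero => rw [show cs.length - i = 0 from by omega]
    | succ f =>
      by_cases hlt : i < cs.length
      · rw [show cs.length - i = (cs.length - i - 1) + 1 from by omega]
        cases hfind : strtrFind cs i its with
        | none =>
          simp only [strtrLoop, if_pos hlt, hfind]
          rw [ih f (by omega) (i + 1) _ (by omega)]
          congr 1
        | some sr =>
          obtain ⟨sk, sr'⟩ := sr
          have hs1 : 0 < sk.toList.length :=
            List.length_pos_of_ne_nil (hk _ (strtrFind_mem cs i its _ hfind))
          simp only [strtrLoop, if_pos hlt, hfind]
          rw [ih f (by omega) (i + sk.toList.length) _ (by omega),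
              ih (cs.length - i - 1) (by omega) (i + sk.toList.length) _ (by omega)]
      · simp [strtrLoop, hlt, show cs.length - i = 0 from by omega]

-- buffers factor out of both loops
theorem strtrLoop_factor (cs : List Char) (its : List (String × String)) :
    ∀ fuel i buf, strtrLoop cs its fuel i buf = buf ++ strtrLoop cs its fuel i [] := by
  intro fuel
  induction fuel with
  | zero => intro i buf; simp [strtrLoop]
  | succ f ih =>
    intro i buf
    by_cases hlt : i < cs.length
    · cases hfind : strtrFind cs i its with
      | none =>
        simp only [strtrLoop, if_pos hlt, hfind]
        rw [ih (i + 1) (buf ++ [String.ofList [cs.getD i ' ']]),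
            ih (i + 1) ([] ++ [String.ofList [cs.getD i ' ']])]
        simp
      | some sr =>
        obtain ⟨sk, sr'⟩ := sr
        simp only [strtrLoop, if_pos hlt, hfind]
        rw [ih (i + sk.toList.length) (buf ++ [sr']), ih (i + sk.toList.length) ([] ++ [sr'])]
        simp
    · simp [strtrLoop, hlt]

theorem strtrAltLoop_factor (cs : List Char) (its : List (String × String)) :
    ∀ fuel i nxt buf, strtrAltLoop cs its fuel i nxt buf =
      ((strtrAltLoop cs its fuel i nxt []).1, buf ++ (strtrAltLoop cs its fuel i nxt []).2) := by
  intro fuel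
  induction fuel with
  | zero => intro i nxt buf; simp [strtrAltLoop]
  | succ f ih =>
    intro i nxt buf
    by_cases hlt : i < cs.length
    · rcases hscan : strtrAltScan cs i (its.zip nxt) with ⟨⟨p, b⟩, nxt2⟩
      cases b with
      | none => simp [strtrAltLoop, hlt, hscan]
      | some kr =>
        obtain ⟨k, r⟩ := kr
        simp only [strtrAltLoop, if_pos hlt, hscan]
        rw [ih (p.toNat + k.toList.length) nxt2
              (buf ++ [String.ofList (PySem.List.slice cs (some (i : Int)) (some p))] ++ [r]),
            ih (p.toNat + k.toList.length) nxt2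
              ([] ++ [String.ofList (PySem.List.slice cs (some (i : Int)) (some p))] ++ [r])]
        simp
    · simp [strtrAltLoop, hlt]

-- the main correspondence, chunk by chunk
theorem main_corr (cs : List Char) (its : List (String × String))
    (hk : ∀ kr ∈ its, kr.1.toList ≠ []) :
    ∀ fuelB i nxt, i ≤ cs.length → cs.length - i ≤ fuelB →
    nxt.length = its.length →
    (∀ pv ∈ its.zip nxt, pvInv cs i pv.1.1 pv.2) →
    pvFlat (strtrLoop cs its (cs.length - i) i []) =
      pvFlat (strtrAltLoop cs its fuelB i nxt []).2 ++
        cs.drop (strtrAltLoop cs its fuelB i nxt []).1 := by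
  intro fuelB
  induction fuelB with
  | zero =>
    intro i nxt hin hf _ _
    rw [show cs.length - i = 0 from by omega]
    have hd : List.drop i cs = [] := List.drop_of_length_le (by omega)
    simp [strtrLoop, strtrAltLoop, hd, pvFlat]
  | succ f ih =>
    intro i nxt hin hf hlen hinv
    have hmap : (its.zip nxt).map Prod.fst = its := List.map_fst_zip (by omega)
    have hall : ∀ pv ∈ its.zip nxt, pv.1.1.toList ≠ [] ∧ pvInv cs i pv.1.1 pv.2 := by
      intro pv hpv
      exact ⟨hk pv.1 (by rw [← hmap]; exact List.mem_map_of_mem hpv), hinv pv hpv⟩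
    by_cases hlt : i < cs.length
    · obtain ⟨hg, hlen2, hinv2⟩ := scan_good cs i (its.zip nxt) hall (le_of_lt hlt)
      rw [hmap] at hg hinv2
      rcases hscan : strtrAltScan cs i (its.zip nxt) with ⟨⟨p, b⟩, nxt2⟩
      rw [hscan] at hg hlen2 hinv2
      cases b with
      | none =>
        obtain ⟨hp, hnone⟩ := hg
        simp only [strtrAltLoop, if_pos hlt, hscan]
        rw [strtrLoop_nomatch cs its i [] (by omega) (fun pos h1 => hnone pos h1),
            List.nil_append, pvFlat_singletons]
        simp [pvFlat]
      | some kr =>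
        obtain ⟨k, r⟩ := kr
        obtain ⟨h0, hile, hbd, hfind, hbelow⟩ := hg
        dsimp only at h0 hile hbd hfind hbelow
        have hp' : p = ((p.toNat : Nat) : Int) := (Int.toNat_of_nonneg h0).symm
        have hk1 : 0 < k.toList.length :=
          List.length_pos_of_ne_nil (hk _ (strtrFind_mem cs _ its _ hfind))
        have hpn : p.toNat < cs.length := by omega
        -- A side: skip to p.toNat, take the match, normalise the fuel
        rw [strtrLoop_skip cs its (p.toNat - i) i [] (by omega)
              (fun pos h1 h2 => hbelow pos h1 (by omega)),
            show i + (p.toNat - i) = p.toNat from by omega,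
            show cs.length - p.toNat = (cs.length - p.toNat - 1) + 1 from by omega]
        simp only [strtrLoop, if_pos hpn, hfind]
        rw [strtrLoop_fuel cs its hk (cs.length - p.toNat - 1) (p.toNat + k.toList.length) _
              (by omega)]
        rw [strtrLoop_factor cs its _ (p.toNat + k.toList.length) _]
        -- B side
        simp only [strtrAltLoop, if_pos hlt, hscan]
        rw [strtrAltLoop_factor cs its f (p.toNat + k.toList.length) nxt2 _]
        have hlen3 : nxt2.length = its.length := by
          rw [hlen2, List.length_zip]; omega
        have hinv3 : ∀ pv ∈ its.zip nxt2, pvInv cs (p.toNat + k.toList.length) pv.1.1 pv.2 :=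
          fun pv hpv => pvInv_mono cs i _ _ _ (hinv2 pv hpv).2 (by omega)
        have hrec := ih (p.toNat + k.toList.length) nxt2 (by omega) (by omega) hlen3 hinv3
        dsimp only
        simp only [List.nil_append, pvFlat_append, pvFlat_singleton, pvFlat_singletons]
        rw [hrec, String.toList_ofList, hp', PySem.List.slice_natCast]
        simp only [List.append_assoc]
        simp
        omega
    · have hi : cs.length - i = 0 := by omega
      rw [hi]
      have hd : List.drop i cs = [] := List.drop_of_length_le (by omega)
      simp [strtrLoop, strtrAltLoop, hlt, hd, pvFlat]

theorem join_empty_sep (xss : List (List Char)) : PySem.Chars.join [] xss = xss.flatten := by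
  induction xss with
  | nil => simp [PySem.Chars.join_nil]
  | cons x rest ih =>
    cases rest with
    | nil => simp [PySem.Chars.join_singleton]
    | cons y t => rw [PySem.Chars.join_cons_cons, List.flatten_cons, ← ih]; simp

theorem join_nil_flat (l : List String) :
    (PySem.Str.join "" l).toList = pvFlat l := by
  rw [PySem.Str.toList_join, show ("" : String).toList = [] from rfl, join_empty_sep, pvFlat]

-- ===== VERDICT (by name: the statement is the Claim_ definition above) =====
theorem strtr_spec : Claim_equal_strtr := by
  intro strng replace _hdom hpre0
  rcases hpre0 with rfl | hpre
  · rfl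
  have hk : ∀ kr ∈ (PySem.Dict.ofList replace).items, kr.1.toList ≠ [] :=
    fun kr h => items_key_nonempty replace hpre kr h
  set cs := strng.toList with hcs
  set its := (PySem.Dict.ofList replace).items with hits
  set nxt0 := its.map (fun kr => PySem.Chars.findFrom cs kr.1.toList 0 none) with hnxt0
  have hzip : its.zip nxt0 = its.map (fun kr => (kr, PySem.Chars.findFrom cs kr.1.toList 0 none)) := by
    rw [hnxt0]
    have h2 := List.zip_map' (f := id)
      (g := fun kr : String × String => PySem.Chars.findFrom cs kr.1.toList 0 none) (l := its)
    simpa using h2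
  have hinv0 : ∀ pv ∈ its.zip nxt0, pvInv cs 0 pv.1.1 pv.2 := by
    intro pv hpv
    rw [hzip] at hpv
    obtain ⟨kr, hkr, rfl⟩ := List.mem_map.mp hpv
    rw [PySem.Chars.findFrom_zero]
    constructor
    · intro hfe pos _ hpref
      exact (PySem.Chars.find_eq_neg_one_iff cs kr.1.toList).mp hfe
        (prefix_drop_infix cs _ 0 pos (Nat.zero_le _) hpref)
    · intro hne
      have hge : 0 ≤ PySem.Chars.find cs kr.1.toList := by
        have := PySem.Chars.neg_one_le_find cs kr.1.toList
        omega
      obtain ⟨h1, h2⟩ := PySem.Chars.find_spec hge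
      exact ⟨hge, h1, fun pos _ hlt => h2 pos hlt⟩
  have h := main_corr cs its hk cs.length 0 nxt0 (Nat.zero_le _) (Nat.le_refl _)
    (by rw [hnxt0]; simp) hinv0
  rw [Nat.sub_zero] at h
  show _ = _
  unfold strtr strtr_alt
  apply String.toList_inj.mp
  rw [join_nil_flat, join_nil_flat, h, pvFlat_append_singleton, String.toList_ofList,
      PySem.List.slice_from_natCast]
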